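-- pv_equiv track=rewrite | github.com/RCBSi/advent-of-code-2019 | day04_monotonic.py | epit
-- ===== SOURCE A (Python) =====
-- def epit(y): # Not every pair is in a triple.s
--     mult = [1]
--     for x in y[1:]:
--         if x == 0:
--             mult[-1] += 1
--         if x != 0:
--             mult += [1]
--     if mult.count(2) > 0:
--         return 1
--     return 0
-- ===== SOURCE B (Python) =====
-- def epit(y):
--     # An A-group of count 2 is exactly an isolated zero in y[1:]:
--     # pad with nonzero sentinels and look for a window (nonzero, 0, nonzero).
--     p = [1] + y[1:] + [1]
--     return int(any(a != 0 and b == 0 and c != 0 for a, b, c in zip(p, p[1:], p[2:])))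
-- ===== Notes on version B (the rewrite author's own statement) =====
-- stated objective: simpler
-- what changed: Replaces the run-length-list building loop plus count(2) scan by a single sliding-window test: pad y[1:] with nonzero sentinels and check for a (nonzero, 0, nonzero) window, i.e. an isolated zero.
import Mathlib
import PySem

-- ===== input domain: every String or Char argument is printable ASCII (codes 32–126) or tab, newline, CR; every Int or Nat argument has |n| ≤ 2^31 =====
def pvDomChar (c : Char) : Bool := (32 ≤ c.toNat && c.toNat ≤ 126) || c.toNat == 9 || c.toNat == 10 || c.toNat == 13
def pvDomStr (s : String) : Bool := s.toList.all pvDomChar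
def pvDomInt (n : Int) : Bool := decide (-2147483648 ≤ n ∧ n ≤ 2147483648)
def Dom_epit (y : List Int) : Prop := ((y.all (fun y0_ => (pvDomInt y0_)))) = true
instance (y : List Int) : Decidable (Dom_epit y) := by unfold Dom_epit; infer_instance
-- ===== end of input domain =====

-- B replaces A's run-length-list building plus count(2) scan by a sliding-window
-- test for an isolated zero over a sentinel-padded tail (objective: simpler).

-- ===== PORT A =====
-- mult[-1] += 1 ; mult is always nonempty here, so dropLast/getLastD is exact
def epitBump (mult : List Int) : List Int := mult.dropLast ++ [mult.getLastD 0 + 1]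

def epitLoop : List Int → List Int → List Int
  | mult, [] => mult
  | mult, x :: rest =>
      epitLoop
        (let m1 := if x = 0 then epitBump mult else mult
         if x ≠ 0 then m1 ++ [1] else m1) rest

def epit (y : List Int) : Int :=
  if (PySem.List.count (epitLoop [1] (PySem.List.slice y (some 1) none)) 2) > 0 then 1 else 0

-- ===== PORT B =====
def epitWin (a b c : Int) : Bool := decide (a ≠ 0) && decide (b = 0) && decide (c ≠ 0)

def epitPad (y : List Int) : List Int := [1] ++ PySem.List.slice y (some 1) none ++ [(1 : Int)]

def epit_alt (y : List Int) : Int :=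
  if (List.zipWith3 epitWin (epitPad y) (PySem.List.slice (epitPad y) (some 1) none)
        (PySem.List.slice (epitPad y) (some 2) none)).any id then 1 else 0

-- ===== PRECONDITION & SPEC =====
def Spec_epit (y : List Int) (out : Int) : Prop := out = epit_alt y
instance (y : List Int) (out : Int) : Decidable (Spec_epit y out) := by unfold Spec_epit; infer_instance

-- ===== CLAIM (what is proved, stated in full; the proofs are below) =====
def Claim_equal_epit : Prop := ∀ (y : List Int), Dom_epit y → Spec_epit y (epit y)

-- ===== LEMMAS AND PROOFS =====

-- W a t: an isolated zero in t, with a the value just before t and a nonzero sentinel after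
def epitW : Int → List Int → Bool
  | _, [] => false
  | a, x :: t => (decide (a ≠ 0) && decide (x = 0) && decide ((t.headD 1) ≠ 0)) || epitW x t

theorem epitLoop_append (t : List Int) : ∀ (ms : List Int) (c : Int),
    epitLoop (ms ++ [c]) t = ms ++ epitLoop [c] t := by
  induction t with
  | nil => intro ms c; simp [epitLoop]
  | cons x t ih =>
    intro ms c
    by_cases hx : x = 0
    · have h1 : epitLoop (ms ++ [c]) (x :: t) = epitLoop (ms ++ [c + 1]) t := by
        simp [epitLoop, hx, epitBump]
      have h2 : epitLoop [c] (x :: t) = epitLoop [c + 1] t := by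
        simp [epitLoop, hx, epitBump]
      rw [h1, h2, ih ms (c + 1)]
    · have h1 : epitLoop (ms ++ [c]) (x :: t) = epitLoop (ms ++ [c] ++ [1]) t := by
        simp [epitLoop, hx]
      have h2 : epitLoop [c] (x :: t) = epitLoop ([c] ++ [1]) t := by
        simp [epitLoop, hx]
      rw [h1, h2, ih (ms ++ [c]) 1, ih [c] 1, List.append_assoc]

theorem epit_main (t : List Int) :
    ((∀ a : Int, a ≠ 0 → ((0 < (epitLoop [1] t).count 2) ↔ epitW a t = true))
    ∧ ((0 < (epitLoop [2] t).count 2) ↔ ((t.headD 1 ≠ 0) ∨ epitW 0 t = true))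
    ∧ (∀ c : Int, 3 ≤ c → ((0 < (epitLoop [c] t).count 2) ↔ epitW 0 t = true))) := by
  induction t with
  | nil =>
    refine ⟨?_, ?_, ?_⟩
    · intro a _; simp [epitLoop, epitW]
    · simp [epitLoop, epitW]
    · intro c hc; simp [epitLoop, epitW]; omega
  | cons x t ih =>
    obtain ⟨ih1, ih2, ih3⟩ := ih
    by_cases hx : x = 0
    · subst hx
      have e1 : epitLoop [1] (0 :: t) = epitLoop [2] t := by simp [epitLoop, epitBump]
      have e2 : epitLoop [2] (0 :: t) = epitLoop [3] t := by norm_num [epitLoop, epitBump]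
      refine ⟨?_, ?_, ?_⟩
      · intro a ha
        rw [e1, ih2]
        simp [epitW, ha]
      · rw [e2, ih3 3 le_rfl]
        simp [epitW]
      · intro c hc
        have ec : epitLoop [c] (0 :: t) = epitLoop [c + 1] t := by simp [epitLoop, epitBump]
        rw [ec, ih3 (c + 1) (by omega)]
        simp [epitW]
    · have e : ∀ c : Int, epitLoop [c] (x :: t) = [c] ++ epitLoop [1] t := by
        intro c
        show epitLoop _ t = _
        simp only [if_neg hx, if_pos hx]
        exact epitLoop_append t [c] 1
      have ecnt : ∀ c : Int, (epitLoop [c] (x :: t)).count 2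
          = (([c] : List Int).count 2) + (epitLoop [1] t).count 2 := by
        intro c; rw [e c, List.count_append]
      refine ⟨?_, ?_, ?_⟩
      · intro a _
        rw [ecnt 1]
        simp only [epitW, hx]
        rw [show (([1] : List Int).count 2) = 0 by decide]
        simp only [Nat.zero_add]
        rw [ih1 x hx]
        simp [hx]
      · rw [ecnt 2]
        simp only [epitW]
        rw [show (([2] : List Int).count 2) = 1 by decide]
        simp [List.headD, hx]
      · intro c hc
        rw [ecnt c]
        rw [show (([c] : List Int).count 2) = 0 by simp [List.count_singleton]; omega]
        simp only [Nat.zero_add]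
        rw [ih1 x hx]
        simp [epitW, hx]

theorem epit_windows (t : List Int) : ∀ a : Int,
    (List.zipWith3 epitWin (a :: (t ++ [1])) (t ++ [1]) ((t ++ [1]).drop 1)).any id
      = epitW a t := by
  induction t with
  | nil => intro a; simp [epitW, List.zipWith3]
  | cons x t ih =>
    intro a
    cases t with
    | nil => simp [epitW, epitWin, List.zipWith3]
    | cons z t' =>
      have := ih x
      simp only [List.cons_append, List.drop_succ_cons, List.drop_zero] at this ⊢
      simp only [List.zipWith3, List.any_cons, this, epitW, epitWin]
      simp [List.headD]

-- ===== VERDICT (by name: the statement is the Claim_ definition above) =====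
theorem epit_spec : Claim_equal_epit := by
  intro y _
  unfold Spec_epit epit epit_alt epitPad
  set t := PySem.List.slice y (some 1) none with ht
  have hp1 : PySem.List.slice ([1] ++ t ++ [(1:Int)]) (some 1) none = t ++ [1] := by
    rw [show ((1:Int) = ((1:Nat):Int)) by norm_num, PySem.List.slice_from_natCast]
    simp
  have hp2 : PySem.List.slice ([1] ++ t ++ [(1:Int)]) (some 2) none = (t ++ [1]).drop 1 := by
    rw [show ((2:Int) = ((2:Nat):Int)) by norm_num, PySem.List.slice_from_natCast]
    simp
  rw [hp1, hp2]
  have hcnt : PySem.List.count (epitLoop [1] t) 2 = (epitLoop [1] t).count 2 :=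
    PySem.List.count_eq _ _
  have hwin : (List.zipWith3 epitWin ((1:Int) :: (t ++ [1])) (t ++ [1]) ((t ++ [1]).drop 1)).any id
      = epitW 1 t := epit_windows t 1
  have hmain := (epit_main t).1 1 (by norm_num)
  rw [hcnt]
  simp only [List.cons_append, List.nil_append] at hwin ⊢
  simp only [hwin]
  by_cases h : epitW 1 t = true
  · rw [if_pos h, if_pos (hmain.mpr h)]
  · rw [if_neg h, if_neg (fun hc => h (hmain.mp hc))]
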